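-- pv_equiv track=rewrite | github.com/Saanlima/Pepino | Projects/Gameduino_mcs/hw_mcs/ise/prep.py | glom
-- ===== SOURCE A (Python) =====
-- def glom(sizes):
--     """ Returns a master size and a list of crop/paste coordinates """
--     mw = max(w for (w,h) in sizes)
--     mh = sum(h for (w,h) in sizes)
--     y = 0
--     r = []
--     for (w,h) in sizes:
--         r.append((0, y, w, y + h))
--         y += h
--     return ((mw,mh), r)
-- ===== SOURCE B (Python) =====
-- def glom(sizes):
--     """ Returns a master size and a list of crop/paste coordinates """
--     mw = max(w for (w, h) in sizes)
--     ys = []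
--     t = 0
--     for (_, h) in sizes:
--         t += h
--         ys.append(t)
--     mh = ys[-1] if ys else 0
--     r = [(0, cur - h, w, cur) for ((w, h), cur) in zip(sizes, ys)]
--     return ((mw, mh), r)
-- ===== Notes on version B (the rewrite author's own statement) =====
-- stated objective: alternative
-- what changed: Replaces A's sum-then-running-accumulator loop by an inclusive prefix-sum table of heights: mh is the table's last entry and each rectangle is read off by zipping sizes with the table.
import Mathlib
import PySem

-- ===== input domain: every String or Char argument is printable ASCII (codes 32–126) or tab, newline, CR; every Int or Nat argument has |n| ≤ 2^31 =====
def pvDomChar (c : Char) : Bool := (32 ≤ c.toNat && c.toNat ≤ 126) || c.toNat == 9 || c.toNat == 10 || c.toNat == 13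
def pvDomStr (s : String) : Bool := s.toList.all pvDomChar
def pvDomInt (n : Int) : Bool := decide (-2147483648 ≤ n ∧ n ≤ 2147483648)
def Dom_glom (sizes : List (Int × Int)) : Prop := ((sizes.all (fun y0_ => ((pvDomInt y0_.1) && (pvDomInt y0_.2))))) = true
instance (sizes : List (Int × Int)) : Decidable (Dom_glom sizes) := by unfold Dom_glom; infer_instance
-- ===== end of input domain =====

-- B replaces A's sum + running-accumulator loop by an inclusive prefix-sum table of heights (alternative decomposition, same cost).


-- ===== PORT A =====
-- mw = max(w for (w,h) in sizes); mh = sum(...); then the running-y loop appending (0,y,w,y+h).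
def glom (sizes : List (Int × Int)) : (Int × Int) × (List (Int × Int × Int × Int)) :=
  let mw : Int := (PySem.List.max? (sizes.map (fun p => p.1)) (fun x => x)).getD 0   -- none only outside Pre_ (empty sizes: Python raises ValueError)
  let mh : Int := (sizes.map (fun p => p.2)).foldl (· + ·) 0
  let yr : Int × List (Int × Int × Int × Int) :=
    sizes.foldl (fun st p => (st.1 + p.2, st.2 ++ [(0, st.1, p.1, st.1 + p.2)])) (0, [])
  ((mw, mh), yr.2)

-- ===== PORT B =====
-- loop building the inclusive prefix-sum table ys of heights
def glomAltYs (sizes : List (Int × Int)) : Int × List Int :=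
  sizes.foldl (fun st p => (st.1 + p.2, st.2 ++ [st.1 + p.2])) (0, [])

def glom_alt (sizes : List (Int × Int)) : (Int × Int) × (List (Int × Int × Int × Int)) :=
  let mw : Int := (PySem.List.max? (sizes.map (fun p => p.1)) (fun x => x)).getD 0   -- none only outside Pre_ (empty sizes: Python raises ValueError)
  let ys : List Int := (glomAltYs sizes).2
  let mh : Int := if ys ≠ [] then (PySem.List.pyGet? ys (-1)).getD 0 else 0   -- ys[-1] if ys else 0
  let r : List (Int × Int × Int × Int) :=
    (sizes.zip ys).map (fun q => (0, q.2 - q.1.2, q.1.1, q.2))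
  ((mw, mh), r)

-- ===== PRECONDITION & SPEC =====
-- Pre_ excludes only the empty list, on which Python A (max of an empty generator) raises ValueError.
def Pre_glom (sizes : List (Int × Int)) : Prop := sizes ≠ []
instance (sizes : List (Int × Int)) : Decidable (Pre_glom sizes) := by unfold Pre_glom; infer_instance
def pvWitness_glom : (List (Int × Int)) := [(3, 2), (5, 4)]

def Spec_glom (sizes : List (Int × Int)) (out : (Int × Int) × (List (Int × Int × Int × Int))) : Prop := out = glom_alt sizes
instance (sizes : List (Int × Int)) (out : (Int × Int) × (List (Int × Int × Int × Int))) : Decidable (Spec_glom sizes out) := by unfold Spec_glom; infer_instance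

-- ===== CLAIM (what is proved, stated in full; the proofs are below) =====
def Claim_equal_glom : Prop := ∀ (sizes : List (Int × Int)), Dom_glom sizes → Pre_glom sizes → Spec_glom sizes (glom sizes)

-- ===== LEMMAS AND PROOFS =====

-- generic shape of both folds: characterize them via a recursive "from y" description
def rectsFrom (y : Int) : List (Int × Int) → List (Int × Int × Int × Int)
  | [] => []
  | (w, h) :: t => (0, y, w, y + h) :: rectsFrom (y + h) t

def accFrom (y : Int) : List (Int × Int) → List Int
  | [] => []
  | (_, h) :: t => (y + h) :: accFrom (y + h) t

theorem foldA_eq (sizes : List (Int × Int)) : ∀ (y : Int) (r : List (Int × Int × Int × Int)),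
    (sizes.foldl (fun st p => (st.1 + p.2, st.2 ++ [(0, st.1, p.1, st.1 + p.2)])) (y, r)).2
      = r ++ rectsFrom y sizes := by
  induction sizes with
  | nil => intro y r; simp [rectsFrom]
  | cons p t ih => intro y r; simp [List.foldl_cons, ih, rectsFrom]

theorem foldB_eq (sizes : List (Int × Int)) : ∀ (y : Int) (ys : List Int),
    (sizes.foldl (fun st p => (st.1 + p.2, st.2 ++ [st.1 + p.2])) (y, ys)).2
      = ys ++ accFrom y sizes := by
  induction sizes with
  | nil => intro y ys; simp [accFrom]
  | cons p t ih => intro y ys; simp [List.foldl_cons, ih, accFrom]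

theorem zip_acc_eq (sizes : List (Int × Int)) : ∀ (y : Int),
    (sizes.zip (accFrom y sizes)).map (fun q => (0, q.2 - q.1.2, q.1.1, q.2)) = rectsFrom y sizes := by
  induction sizes with
  | nil => intro y; simp [accFrom, rectsFrom]
  | cons p t ih =>
    intro y
    obtain ⟨w, h⟩ := p
    simp [accFrom, rectsFrom, ih]

theorem last_acc (sizes : List (Int × Int)) : ∀ (y : Int),
    (accFrom y sizes).getLast?.getD y = y + (sizes.map (fun p => p.2)).foldl (· + ·) 0 := by
  induction sizes with
  | nil => intro y; simp [accFrom]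
  | cons p t ih =>
    intro y
    have hf : ∀ (c : Int) (l : List Int), l.foldl (· + ·) c = c + l.foldl (· + ·) 0 := by
      intro c l
      induction l generalizing c with
      | nil => simp
      | cons a l ihl => simp [List.foldl_cons, ihl (c + a), ihl a]; ring
    cases ht : accFrom (y + p.2) t with
    | nil =>
      have := ih (y + p.2)
      rw [ht] at this
      simp at this
      simp [accFrom, ht, List.foldl_cons, hf p.2]
      omega
    | cons a l =>
      have hne : (a :: l) ≠ ([] : List Int) := by simp
      obtain ⟨v, hv⟩ : ∃ v, (a :: l).getLast? = some v := by
        cases e : (a :: l).getLast? with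
        | none => exact absurd (List.getLast?_eq_none_iff.mp e) hne
        | some v => exact ⟨v, rfl⟩
      have := ih (y + p.2)
      rw [ht, hv] at this
      simp at this
      simp [accFrom, ht, hv]
      rw [this]
      simp [hf p.2]
      ring

-- ===== VERDICT (by name: the statement is the Claim_ definition above) =====
theorem glom_spec : Claim_equal_glom := by
  intro sizes _ hpre
  unfold Spec_glom glom glom_alt glomAltYs
  simp only [foldA_eq, foldB_eq, zip_acc_eq, List.nil_append]
  have hys : accFrom 0 sizes ≠ [] := by
    cases sizes with
    | nil => exact absurd rfl hpre
    | cons p t => simp [accFrom]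
  have hlast := last_acc sizes 0
  simp only [zero_add] at hlast
  simp [hys, PySem.List.pyGet?_neg_one, hlast]
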